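-- pv_equiv track=rewrite | github.com/MiAneko24/bmstu_aa_5_semester | lab_07/src/mes.py | get_seg_dict
-- ===== SOURCE A (Python) =====
-- def get_seg_dict(animals_dict):
--     seg_dict = {}
--     for a in animals_dict.keys():
--         if a[0] not in seg_dict.keys():
--             seg_dict[a[0]] = {}
--     for i in animals_dict.items():
--         seg_dict[i[0][0]][i[0]] = i[1]
--     return seg_dict
-- ===== SOURCE B (Python) =====
-- def get_seg_dict(animals_dict):
--     firsts = list(dict.fromkeys(k[0] for k in animals_dict))
--     return {c: {k: v for k, v in animals_dict.items() if k[0] == c}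
--             for c in firsts}
-- ===== Notes on version B (the rewrite author's own statement) =====
-- stated objective: idiomatic
-- what changed: A pre-creates blank inner dicts in one pass and mutates them item-by-item in a second pass; B dedups the leading characters once (dict.fromkeys) and builds the whole result as a nested dict comprehension, one filtering scan per group.
import Mathlib
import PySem

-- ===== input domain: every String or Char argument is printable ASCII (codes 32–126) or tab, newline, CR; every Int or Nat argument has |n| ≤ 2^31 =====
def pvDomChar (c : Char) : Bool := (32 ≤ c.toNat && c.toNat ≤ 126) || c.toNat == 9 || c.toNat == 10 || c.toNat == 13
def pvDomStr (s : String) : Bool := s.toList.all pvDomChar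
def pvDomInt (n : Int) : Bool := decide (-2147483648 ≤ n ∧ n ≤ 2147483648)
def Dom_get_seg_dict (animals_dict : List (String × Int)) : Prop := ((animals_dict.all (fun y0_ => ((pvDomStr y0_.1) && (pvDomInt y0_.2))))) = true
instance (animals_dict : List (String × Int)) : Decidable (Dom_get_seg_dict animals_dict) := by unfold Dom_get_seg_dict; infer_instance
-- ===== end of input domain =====

-- B replaces A's two mutation passes (pre-create blank inner dicts, then fill them) by a
-- dedup of the leading characters plus one filtering scan per group (a nested dict comprehension);
-- same result, not faster (O(n*g) vs O(n)).


-- ===== PORT A =====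
-- k[0] for a string key; the [] branch is unreachable under Pre_ (keys are nonempty)
def pvFc (k : String) : String :=
  match k.toList with
  | [] => ""
  | c :: _ => String.ofList [c]

def get_seg_dict (animals_dict : List (String × Int)) : List (String × List (String × Int)) :=
  -- first loop: "if a[0] not in seg_dict.keys(): seg_dict[a[0]] = {}"
  let seg1 : PySem.Dict String (PySem.Dict String Int) :=
    animals_dict.foldl (fun seg a =>
      if seg.contains (pvFc a.1) then seg else seg.insert (pvFc a.1) PySem.Dict.empty)
      PySem.Dict.empty
  -- second loop: "seg_dict[i[0][0]][i[0]] = i[1]"  (the outer key is always present after pass 1,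
  -- so Dict.modify with an unused Dict.empty default is exact here)
  let seg2 : PySem.Dict String (PySem.Dict String Int) :=
    animals_dict.foldl (fun seg i =>
      seg.modify (pvFc i.1) PySem.Dict.empty (fun inner => inner.insert i.1 i.2)) seg1
  seg2.items.map (fun q => (q.1, q.2.items))

-- ===== PORT B =====
def get_seg_dict_alt (animals_dict : List (String × Int)) : List (String × List (String × Int)) :=
  let firsts := PySem.List.dedup (animals_dict.map (fun k => pvFc k.1))
  firsts.map (fun c =>
    (c, ((animals_dict.filter (fun p => pvFc p.1 == c)).foldl
          (fun d p => d.insert p.1 p.2) (PySem.Dict.empty : PySem.Dict String Int)).items))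

-- ===== PRECONDITION & SPEC =====
-- Pre_ excludes exactly the inputs containing a zero-length key, on which Python A raises IndexError at a[0].
def Pre_get_seg_dict (animals_dict : List (String × Int)) : Prop :=
  ∀ p ∈ animals_dict, p.1 ≠ ""
instance (animals_dict : List (String × Int)) : Decidable (Pre_get_seg_dict animals_dict) := by unfold Pre_get_seg_dict; infer_instance

def pvWitness_get_seg_dict : (List (String × Int)) := [("ax", 1), ("by", 2), ("a", 3)]

def Spec_get_seg_dict (animals_dict : List (String × Int)) (out : List (String × List (String × Int))) : Prop := out = get_seg_dict_alt animals_dict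
instance (animals_dict : List (String × Int)) (out : List (String × List (String × Int))) : Decidable (Spec_get_seg_dict animals_dict out) := by unfold Spec_get_seg_dict; infer_instance

-- ===== CLAIM (what is proved, stated in full; the proofs are below) =====
def Claim_equal_get_seg_dict : Prop := ∀ (animals_dict : List (String × Int)), Dom_get_seg_dict animals_dict → Pre_get_seg_dict animals_dict → Spec_get_seg_dict animals_dict (get_seg_dict animals_dict)

-- ===== LEMMAS AND PROOFS =====

-- pass 1 collects exactly the leading characters, in first-appearance order
theorem keys_pass1 (l : List (String × Int)) (d : PySem.Dict String (PySem.Dict String Int)) :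
    (l.foldl (fun seg a =>
      if seg.contains (pvFc a.1) then seg else seg.insert (pvFc a.1) PySem.Dict.empty) d).keys
    = PySem.Set.update d.keys (l.map (fun a => pvFc a.1)) := by
  induction l generalizing d with
  | nil => rfl
  | cons p t ih =>
    simp only [List.foldl_cons, List.map_cons, PySem.Set.update_cons]
    by_cases h : d.contains (pvFc p.1) = true
    · rw [if_pos h, ih, PySem.Set.add_of_mem ((PySem.Dict.contains_iff_mem_keys d (pvFc p.1)).1 h)]
    · have h' : d.contains (pvFc p.1) = false := by simpa using h
      rw [if_neg h, ih, PySem.Dict.keys_insert_of_not_contains d PySem.Dict.empty h',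
        PySem.Set.add_of_not_mem (fun hm => h ((PySem.Dict.contains_iff_mem_keys d (pvFc p.1)).2 hm))]

-- pass 1 never changes a getD-with-empty-default lookup (new entries hold Dict.empty)
theorem getD_pass1 (l : List (String × Int)) (d : PySem.Dict String (PySem.Dict String Int)) (c : String) :
    (l.foldl (fun seg a =>
      if seg.contains (pvFc a.1) then seg else seg.insert (pvFc a.1) PySem.Dict.empty) d).getD c PySem.Dict.empty
    = d.getD c PySem.Dict.empty := by
  induction l generalizing d with
  | nil => rfl
  | cons p t ih =>
    simp only [List.foldl_cons]
    by_cases h : d.contains (pvFc p.1) = true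
    · rw [if_pos h, ih]
    · have h' : d.contains (pvFc p.1) = false := by simpa using h
      rw [if_neg h, ih, PySem.Dict.getD_insert]
      split_ifs with hc
      · rw [hc]
        exact (PySem.Dict.getD_of_not_contains d PySem.Dict.empty h').symm
      · rfl

-- pass 2, seen through getD at any key c, is exactly B's per-group insert fold
theorem getD_pass2 (l : List (String × Int)) (d : PySem.Dict String (PySem.Dict String Int)) (c : String) :
    (l.foldl (fun seg i =>
      seg.modify (pvFc i.1) PySem.Dict.empty (fun inner => inner.insert i.1 i.2)) d).getD c PySem.Dict.empty
    = (l.filter (fun p => pvFc p.1 == c)).foldl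
        (fun inner p => inner.insert p.1 p.2) (d.getD c PySem.Dict.empty) := by
  induction l generalizing d with
  | nil => rfl
  | cons p t ih =>
    by_cases h : pvFc p.1 = c
    · have hb : (pvFc p.1 == c) = true := by simp [h]
      simp only [List.foldl_cons, List.filter_cons, hb, if_pos]
      rw [ih, h, PySem.Dict.getD_modify_self]
    · have hb : (pvFc p.1 == c) = false := by simp [h]
      simp only [List.foldl_cons, List.filter_cons, hb, Bool.false_eq_true, if_neg,
        not_false_eq_true]
      rw [ih, PySem.Dict.getD_modify_of_ne d PySem.Dict.empty
        (fun inner => inner.insert p.1 p.2) (fun he => h (Eq.symm he))]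

-- updating a set with elements it already contains changes nothing
theorem set_update_self (xs : List String) :
    PySem.Set.update (PySem.Set.ofList xs) xs = PySem.Set.ofList xs := by
  have hfil : List.filter (fun y => !(PySem.Set.ofList xs).contains y) (PySem.Set.ofList xs) = [] := by
    apply List.filter_eq_nil_iff.2
    intro a ha
    simp [(PySem.Set.mem_ofList xs a).1 ha]
  rw [PySem.Set.update_eq_append_filter, hfil, List.append_nil]

-- the two ports agree on every input
theorem ab_eq (l : List (String × Int)) : get_seg_dict l = get_seg_dict_alt l := by
  simp only [get_seg_dict, get_seg_dict_alt]
  rw [PySem.List.dedup_eq_ofList]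
  have hk2 : (l.foldl (fun seg i =>
      seg.modify (pvFc i.1) PySem.Dict.empty (fun inner => inner.insert i.1 i.2))
      (l.foldl (fun seg a =>
        if seg.contains (pvFc a.1) then seg else seg.insert (pvFc a.1) PySem.Dict.empty)
        PySem.Dict.empty)).keys = PySem.Set.ofList (l.map (fun k => pvFc k.1)) := by
    rw [PySem.Dict.keys_foldl_modify_key l (fun i => pvFc i.1) PySem.Dict.empty
      (fun _ i inner => inner.insert i.1 i.2), keys_pass1, PySem.Dict.keys_empty,
      PySem.Set.update_nil_left, set_update_self]
  have hnd : (l.foldl (fun seg i =>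
      seg.modify (pvFc i.1) PySem.Dict.empty (fun inner => inner.insert i.1 i.2))
      (l.foldl (fun seg a =>
        if seg.contains (pvFc a.1) then seg else seg.insert (pvFc a.1) PySem.Dict.empty)
        PySem.Dict.empty)).keys.Nodup := by
    rw [hk2]; exact PySem.Set.nodup_ofList _
  rw [PySem.Dict.items_eq_map_keys _ hnd PySem.Dict.empty, hk2, List.map_map]
  apply List.map_congr_left
  intro c _
  simp only [Function.comp_apply]
  rw [getD_pass2, getD_pass1, PySem.Dict.getD_empty]

-- ===== VERDICT (by name: the statement is the Claim_ definition above) =====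
theorem get_seg_dict_spec : Claim_equal_get_seg_dict := by
  intro l _ _
  exact ab_eq l
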